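-- pv_equiv track=rewrite | github.com/jborchma/project_euler | Solutions/1-100/p89.py | clean_numeral
-- ===== SOURCE A (Python) =====
-- def clean_numeral(numeral):
--     """This function cleans a roman numeral and makes it optimal
--     """
--     saved = 0
--     corresponding_five = ["V", "L", "D"]
--     for i, symbol in enumerate(["I", "X", "C"]):
--         if symbol * 9 in numeral:
--             saved += 7
--         elif symbol * 8 in numeral:
--             saved += 4
--         elif symbol * 7 in numeral:
--             saved += 4
--         elif symbol * 6 in numeral:
--             saved += 4
--         elif symbol * 5 in numeral:
--             saved += 4
--         elif symbol * 4 in numeral and corresponding_five[i] not in numeral: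
--             saved += 2
--
--     for combination in ["VIIII", "LXXXX", "DCCCC"]:
--         if combination in numeral:
--             saved += 3
--
--     return saved
-- ===== SOURCE B (Python) =====
-- def clean_numeral(numeral):
--     """This function cleans a roman numeral and makes it optimal
--     """
--     saved = 0
--     for symbol, five in (("I", "V"), ("X", "L"), ("C", "D")):
--         best = run = 0
--         for ch in numeral:
--             run = run + 1 if ch == symbol else 0
--             if run > best:
--                 best = run
--         if best >= 9:
--             saved += 7
--         elif best >= 5:
--             saved += 4
--         elif best == 4 and five not in numeral:
--             saved += 2
--     for combination in ("VIIII", "LXXXX", "DCCCC"):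
--         if combination in numeral:
--             saved += 3
--     return saved
-- ===== Notes on version B (the rewrite author's own statement) =====
-- stated objective: alternative
-- what changed: A's fixed cascade of six repeated-substring membership tests per symbol is replaced by a single longest-consecutive-run scan per symbol followed by one threshold branch (>=9 -> 7, 5..8 -> 4, ==4 with the five-symbol absent -> 2); the VIIII/LXXXX/DCCCC loop is kept.
import Mathlib
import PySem

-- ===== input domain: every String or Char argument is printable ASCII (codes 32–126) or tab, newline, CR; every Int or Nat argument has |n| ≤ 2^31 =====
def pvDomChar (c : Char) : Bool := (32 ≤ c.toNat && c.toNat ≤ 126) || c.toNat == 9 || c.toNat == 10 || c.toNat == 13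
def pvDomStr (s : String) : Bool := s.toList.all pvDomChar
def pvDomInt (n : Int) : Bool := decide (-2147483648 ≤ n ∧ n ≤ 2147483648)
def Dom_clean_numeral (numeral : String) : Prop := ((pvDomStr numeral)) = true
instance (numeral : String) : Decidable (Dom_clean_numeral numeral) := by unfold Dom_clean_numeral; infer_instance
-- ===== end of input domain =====

-- B replaces A's cascade of substring-membership tests by one longest-run scan per
-- symbol plus a threshold branch (alternative decomposition; same asymptotic cost).

-- ===== PORT A =====
-- symbol * n (Python string repetition)
def pvStrMul (s : String) (n : Nat) : String := String.ofList ((List.replicate n s.toList).flatten)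

def clean_numeral (numeral : String) : Int :=
  let corresponding_five : List String := ["V", "L", "D"]
  let saved : Int :=
    (PySem.List.enumerate ["I", "X", "C"]).foldl (fun saved p =>
      let i := p.1
      let symbol := p.2
      if PySem.Str.isIn (pvStrMul symbol 9) numeral then saved + 7
      else if PySem.Str.isIn (pvStrMul symbol 8) numeral then saved + 4
      else if PySem.Str.isIn (pvStrMul symbol 7) numeral then saved + 4
      else if PySem.Str.isIn (pvStrMul symbol 6) numeral then saved + 4
      else if PySem.Str.isIn (pvStrMul symbol 5) numeral then saved + 4
      else if PySem.Str.isIn (pvStrMul symbol 4) numeral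
              && !(PySem.Str.isIn (PySem.List.pyGetD corresponding_five i "") numeral) then saved + 2
      else saved) 0
  ["VIIII", "LXXXX", "DCCCC"].foldl (fun saved combination =>
    if PySem.Str.isIn combination numeral then saved + 3 else saved) saved

-- ===== PORT B =====
-- state (best, run) of B's inner scan over the characters
def pvBestRun (symbol : Char) (cs : List Char) : Nat × Nat :=
  cs.foldl (fun p ch =>
    let run := if ch == symbol then p.2 + 1 else 0
    (if run > p.1 then run else p.1, run)) (0, 0)

def clean_numeral_alt (numeral : String) : Int :=
  let saved : Int :=
    [('I', "V"), ('X', "L"), ('C', "D")].foldl (fun saved sf =>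
      let best := (pvBestRun sf.1 numeral.toList).1
      if best ≥ 9 then saved + 7
      else if best ≥ 5 then saved + 4
      else if best == 4 && !(PySem.Str.isIn sf.2 numeral) then saved + 2
      else saved) 0
  ["VIIII", "LXXXX", "DCCCC"].foldl (fun saved combination =>
    if PySem.Str.isIn combination numeral then saved + 3 else saved) saved

-- ===== PRECONDITION & SPEC =====
def Spec_clean_numeral (numeral : String) (out : Int) : Prop := out = clean_numeral_alt numeral
instance (numeral : String) (out : Int) : Decidable (Spec_clean_numeral numeral out) := by unfold Spec_clean_numeral; infer_instance

-- ===== CLAIM (what is proved, stated in full; the proofs are below) =====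
def Claim_equal_clean_numeral : Prop := ∀ (numeral : String), Dom_clean_numeral numeral → Spec_clean_numeral numeral (clean_numeral numeral)

-- ===== LEMMAS AND PROOFS =====

/-- `pvG c l r` = the largest run of `c`s seen while scanning `l`, a run of length `r`
    ending just before `l` (0 if `l` is empty). -/
def pvG (c : Char) : List Char → Nat → Nat
  | [], _ => 0
  | x :: xs, r =>
    let r' := if x == c then r + 1 else 0
    max r' (pvG c xs r')

lemma pv_if_max (b t : Nat) : (if t > b then t else b) = max b t := by
  rcases Nat.lt_or_ge b t with h | h
  · rw [if_pos h, Nat.max_eq_right h.le]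
  · rw [if_neg (by omega), Nat.max_eq_left h]

lemma pvBestRun_foldl (c : Char) (l : List Char) :
    ∀ b r, (l.foldl (fun p ch =>
      let run := if ch == c then p.2 + 1 else 0
      (if run > p.1 then run else p.1, run)) (b, r)).1 = max b (pvG c l r) := by
  induction l with
  | nil => intro b r; simp [pvG]
  | cons x xs ih =>
    intro b r
    rw [List.foldl_cons]
    have hinit : (let run := if (x == c) = true then (b, r).2 + 1 else 0
        ((if run > (b, r).1 then run else (b, r).1, run) : Nat × Nat))
        = (if (if (x == c) = true then r + 1 else 0) > b
             then (if (x == c) = true then r + 1 else 0) else b,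
           if (x == c) = true then r + 1 else 0) := rfl
    rw [hinit, ih, pv_if_max]
    simp only [pvG, Nat.max_assoc]

lemma pvBestRun_eq (c : Char) (l : List Char) : (pvBestRun c l).1 = pvG c l 0 := by
  unfold pvBestRun
  rw [pvBestRun_foldl c l 0 0, Nat.zero_max]

lemma pvG_of_prefix (c : Char) (k : Nat) (hk : 1 ≤ k) :
    ∀ (l : List Char) (r : Nat), List.replicate k c <+: l → k + r ≤ pvG c l r := by
  induction k with
  | zero => omega
  | succ k ih =>
    intro l r hpre
    rcases l with _ | ⟨x, xs⟩
    · simp [List.replicate_succ] at hpre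
    · rw [List.replicate_succ] at hpre
      obtain ⟨hx, htail⟩ := List.cons_prefix_cons.mp hpre
      subst hx
      simp only [pvG, beq_self_eq_true, if_true]
      rcases Nat.eq_zero_or_pos k with rfl | hk1
      · omega
      · have := ih hk1 xs (r + 1) htail
        omega

lemma pvG_of_infix (c : Char) (k : Nat) (hk : 1 ≤ k) :
    ∀ (l : List Char) (r : Nat), List.replicate k c <:+: l → k ≤ pvG c l r := by
  intro l
  induction l with
  | nil =>
    intro r h
    have h0 : k = 0 := by simpa using List.eq_nil_of_infix_nil h
    omega
  | cons x xs ih =>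
    intro r h
    rcases List.infix_cons_iff.mp h with hpre | hinf
    · have := pvG_of_prefix c k hk (x :: xs) r hpre
      omega
    · have := ih (if x == c then r + 1 else 0) hinf
      simp only [pvG]
      omega

lemma pvG_to_infix (c : Char) (k : Nat) (hk : 1 ≤ k) :
    ∀ (l : List Char) (r : Nat), k ≤ pvG c l r →
      List.replicate k c <:+: (List.replicate r c ++ l) := by
  intro l
  induction l with
  | nil => intro r h; simp [pvG] at h; omega
  | cons x xs ih =>
    intro r h
    simp only [pvG] at h
    by_cases hx : x == c
    · have hxc : x = c := by simpa using hx
      subst hxc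
      have heq : List.replicate r x ++ x :: xs = List.replicate (r + 1) x ++ xs := by
        rw [List.replicate_succ']; simp
      rw [heq]
      simp only [beq_self_eq_true, if_true] at h
      by_cases hle : k ≤ r + 1
      · have h1 : List.replicate k x <+: List.replicate (r + 1) x :=
          ⟨List.replicate (r + 1 - k) x, by rw [← List.replicate_add]; congr 1; omega⟩
        exact (h1.trans (List.prefix_append _ _)).isInfix
      · exact ih (r + 1) (by omega)
    · simp only [hx, Bool.false_eq_true, if_false] at h
      have htail := ih 0 (by omega)
      simp only [List.replicate_zero, List.nil_append] at htail
      exact htail.trans ((List.suffix_cons x xs).trans (List.suffix_append _ _)).isInfix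

/-- a run of ≥ k consecutive `c`s occurs in `l` iff B's best-run reaches `k` -/
lemma isIn_replicate_iff (c : Char) (l : List Char) (k : Nat) (hk : 1 ≤ k) :
    PySem.Chars.isIn (List.replicate k c) l = true ↔ k ≤ (pvBestRun c l).1 := by
  rw [PySem.Chars.isIn_iff_infix, pvBestRun_eq]
  constructor
  · exact fun h => pvG_of_infix c k hk l 0 h
  · intro h
    have := pvG_to_infix c k hk l 0 h
    simpa using this

lemma isIn_strMul_eq (s : String) (sym : Char) (hs : s.toList = [sym]) (numeral : String)
    (k : Nat) (hk : 1 ≤ k) :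
    PySem.Str.isIn (pvStrMul s k) numeral
      = decide (k ≤ (pvBestRun sym numeral.toList).1) := by
  have h1 : (pvStrMul s k).toList = List.replicate k sym := by
    simp [pvStrMul, hs]
  rw [show PySem.Str.isIn (pvStrMul s k) numeral
        = PySem.Chars.isIn (List.replicate k sym) numeral.toList from by
      rw [PySem.Str.isIn_eq, h1]]
  by_cases h : k ≤ (pvBestRun sym numeral.toList).1
  · rw [(isIn_replicate_iff sym numeral.toList k hk).mpr h, decide_eq_true h]
  · have hf : PySem.Chars.isIn (List.replicate k sym) numeral.toList = false := by
      rcases hb : PySem.Chars.isIn (List.replicate k sym) numeral.toList with _ | _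
      · rfl
      · exact absurd ((isIn_replicate_iff sym numeral.toList k hk).mp hb) h
    rw [hf, decide_eq_false h]

-- A's per-symbol cascade and B's per-symbol threshold branch, as named step functions
def pvA (numeral : String) (saved : Int) (sym five : String) : Int :=
  if PySem.Str.isIn (pvStrMul sym 9) numeral then saved + 7
  else if PySem.Str.isIn (pvStrMul sym 8) numeral then saved + 4
  else if PySem.Str.isIn (pvStrMul sym 7) numeral then saved + 4
  else if PySem.Str.isIn (pvStrMul sym 6) numeral then saved + 4
  else if PySem.Str.isIn (pvStrMul sym 5) numeral then saved + 4
  else if PySem.Str.isIn (pvStrMul sym 4) numeral && !(PySem.Str.isIn five numeral) then saved + 2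
  else saved

def pvB (numeral : String) (saved : Int) (sym : Char) (five : String) : Int :=
  let best := (pvBestRun sym numeral.toList).1
  if best ≥ 9 then saved + 7
  else if best ≥ 5 then saved + 4
  else if best == 4 && !(PySem.Str.isIn five numeral) then saved + 2
  else saved

lemma pv_final_A (numeral : String) :
    clean_numeral numeral
      = ["VIIII", "LXXXX", "DCCCC"].foldl (fun saved combination =>
          if PySem.Str.isIn combination numeral then saved + 3 else saved)
          (pvA numeral (pvA numeral (pvA numeral 0 "I" "V") "X" "L") "C" "D") := rfl

lemma pv_final_B (numeral : String) :
    clean_numeral_alt numeral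
      = ["VIIII", "LXXXX", "DCCCC"].foldl (fun saved combination =>
          if PySem.Str.isIn combination numeral then saved + 3 else saved)
          (pvB numeral (pvB numeral (pvB numeral 0 'I' "V") 'X' "L") 'C' "D") := rfl

-- per-symbol: A's cascade of repeated-substring tests equals B's threshold branch
lemma pv_step (numeral : String) (saved : Int) (s : String) (sym : Char) (five : String)
    (hs : s.toList = [sym]) :
    pvA numeral saved s five = pvB numeral saved sym five := by
  unfold pvA pvB
  simp only [isIn_strMul_eq s sym hs numeral 9 (by omega), isIn_strMul_eq s sym hs numeral 8 (by omega),
    isIn_strMul_eq s sym hs numeral 7 (by omega), isIn_strMul_eq s sym hs numeral 6 (by omega),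
    isIn_strMul_eq s sym hs numeral 5 (by omega), isIn_strMul_eq s sym hs numeral 4 (by omega)]
  set best := (pvBestRun sym numeral.toList).1 with hbest
  rcases hb : PySem.Str.isIn five numeral with _ | _ <;>
    simp only [Bool.not_false, Bool.not_true, Bool.and_true, Bool.and_false,
      decide_eq_true_eq, beq_iff_eq, ge_iff_le, if_false, Bool.false_eq_true] <;>
    split_ifs <;> omega

lemma pv_step_I (numeral : String) (saved : Int) :
    pvA numeral saved "I" "V" = pvB numeral saved 'I' "V" :=
  pv_step numeral saved "I" 'I' "V" (by simp)

lemma pv_step_X (numeral : String) (saved : Int) :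
    pvA numeral saved "X" "L" = pvB numeral saved 'X' "L" :=
  pv_step numeral saved "X" 'X' "L" (by simp)

lemma pv_step_C (numeral : String) (saved : Int) :
    pvA numeral saved "C" "D" = pvB numeral saved 'C' "D" :=
  pv_step numeral saved "C" 'C' "D" (by simp)

-- ===== VERDICT (by name: the statement is the Claim_ definition above) =====
theorem clean_numeral_spec : Claim_equal_clean_numeral := by
  intro numeral _
  unfold Spec_clean_numeral
  rw [pv_final_A, pv_final_B, pv_step_I, pv_step_X, pv_step_C]
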